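-- pv_equiv track=rewrite | github.com/Nibedita-karmokar/DAC-Layout-Generator- | DAC_Layout_Generator/Global_detailed_routing_main.py | xy_value_top
-- ===== SOURCE A (Python) =====
-- def xy_value_top(track, inter_connect_array, width):
--     y_list=[]
--     y_max=0
--     f=0
--
--     if len(inter_connect_array)>1:
--         for i in range (len(inter_connect_array)):
--
--             if abs(inter_connect_array[i][0]-track)<width:
--                 f=1
--                 y_list.append(inter_connect_array[i][1])
--     elif len(inter_connect_array)==1:
--         y_max=inter_connect_array[0][1]
--
--     if f==1:
--         y_max=max(y_list)
--     x_list=[]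
--     for t in range (len(inter_connect_array)):
--         x_list.append(inter_connect_array[t])
--     x_value=0
--
--     for x_c in range (len(x_list)):
--         if x_list[x_c][1]==y_max:
--             if abs(x_list[x_c][0]-track)<width:
--                 x_value=x_list[x_c][0]
--                 break
--
--     return x_value, y_max
-- ===== SOURCE B (Python) =====
-- def xy_value_top(track, inter_connect_array, width):
--     if len(inter_connect_array) == 1:
--         x, y = inter_connect_array[0]
--         return (x if abs(x - track) < width else 0), y
--     found = False
--     y_max = 0
--     x_value = 0
--     for x, y in inter_connect_array:
--         if abs(x - track) < width and (not found or y > y_max):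
--             found = True
--             y_max = y
--             x_value = x
--     return x_value, y_max
-- ===== Notes on version B (the rewrite author's own statement) =====
-- stated objective: simpler
-- what changed: Replaced A's three passes (collect nearby y's into a list, max() over it, copy the array and rescan it for the matching x with a break) by one single-pass running argmax with a found-flag, plus an explicit single-point case.
import Mathlib
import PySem

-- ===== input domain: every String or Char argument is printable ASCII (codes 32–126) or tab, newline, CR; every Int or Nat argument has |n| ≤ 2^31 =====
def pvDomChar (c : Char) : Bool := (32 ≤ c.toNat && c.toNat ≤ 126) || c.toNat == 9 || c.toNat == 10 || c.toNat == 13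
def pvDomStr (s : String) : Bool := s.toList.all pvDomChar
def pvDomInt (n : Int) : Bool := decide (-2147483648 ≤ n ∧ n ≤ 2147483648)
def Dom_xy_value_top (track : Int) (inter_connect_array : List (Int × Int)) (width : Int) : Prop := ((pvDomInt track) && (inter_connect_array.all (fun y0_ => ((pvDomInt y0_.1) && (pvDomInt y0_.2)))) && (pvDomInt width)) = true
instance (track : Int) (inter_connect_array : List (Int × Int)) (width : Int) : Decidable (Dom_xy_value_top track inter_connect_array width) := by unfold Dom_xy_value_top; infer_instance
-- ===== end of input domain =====

-- B fuses A's collect-list / max() / rescan-with-break passes into one argmax pass (objective: simpler single pass).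

-- ===== PORT A =====
-- the first loop: collects y-coordinates of points near the track, flag f
def pvA_collect (track width : Int) (arr : List (Int × Int)) : Int × List Int :=
  arr.foldl (fun st p => if |p.1 - track| < width then (1, st.2 ++ [p.2]) else st) (0, [])

-- the final loop with break: first x with matching y and near the track, else 0
def pvA_xloop (track width y_max : Int) : List (Int × Int) → Int
  | [] => 0
  | p :: rest =>
      if p.2 = y_max then
        (if |p.1 - track| < width then p.1 else pvA_xloop track width y_max rest)
      else pvA_xloop track width y_max rest

def xy_value_top (track : Int) (inter_connect_array : List (Int × Int)) (width : Int) : Int × Int :=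
  let st := if inter_connect_array.length > 1 then pvA_collect track width inter_connect_array else (0, ([] : List Int))
  let y_max : Int :=
    if inter_connect_array.length > 1 then 0
    else if inter_connect_array.length = 1 then ((PySem.List.pyGet? inter_connect_array 0).getD (0, 0)).2
    else 0
  let y_max := if st.1 = 1 then ((PySem.List.max? st.2 (fun y => y)).getD y_max) else y_max
  let x_list := inter_connect_array.foldl (fun acc p => acc ++ [p]) []
  (pvA_xloop track width y_max x_list, y_max)

-- ===== PORT B =====
def pvB_step (track width : Int) (st : Bool × Int × Int) (p : Int × Int) : Bool × Int × Int :=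
  if |p.1 - track| < width ∧ (st.1 = false ∨ st.2.1 < p.2) then (true, p.2, p.1) else st

def xy_value_top_alt (track : Int) (inter_connect_array : List (Int × Int)) (width : Int) : Int × Int :=
  match inter_connect_array with
  | [p] => ((if |p.1 - track| < width then p.1 else 0), p.2)
  | _ =>
    let st := inter_connect_array.foldl (pvB_step track width) (false, 0, 0)
    (st.2.2, st.2.1)

-- ===== PRECONDITION & SPEC =====
def Spec_xy_value_top (track : Int) (inter_connect_array : List (Int × Int)) (width : Int) (out : Int × Int) : Prop := out = xy_value_top_alt track inter_connect_array width
instance (track : Int) (inter_connect_array : List (Int × Int)) (width : Int) (out : Int × Int) : Decidable (Spec_xy_value_top track inter_connect_array width out) := by unfold Spec_xy_value_top; infer_instance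

-- ===== CLAIM (what is proved, stated in full; the proofs are below) =====
def Claim_equal_xy_value_top : Prop := ∀ (track : Int) (inter_connect_array : List (Int × Int)) (width : Int), Dom_xy_value_top track inter_connect_array width → Spec_xy_value_top track inter_connect_array width (xy_value_top track inter_connect_array width)

-- ===== LEMMAS AND PROOFS =====

-- the near-the-track predicate
def pvNear (track width : Int) (p : Int × Int) : Bool := decide (|p.1 - track| < width)

-- first x among points whose y equals m (0 if none)
def pvFirst (m : Int) : List (Int × Int) → Int
  | [] => 0
  | p :: rest => if p.2 = m then p.1 else pvFirst m rest

lemma pvA_collect_spec (track width : Int) (l : List (Int × Int)) (f : Int) (ys : List Int) :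
    l.foldl (fun st p => if |p.1 - track| < width then (1, st.2 ++ [p.2]) else st) (f, ys)
      = (if l.filter (pvNear track width) = [] then f else 1,
         ys ++ (l.filter (pvNear track width)).map Prod.snd) := by
  induction l generalizing f ys with
  | nil => simp
  | cons p l ih =>
      simp only [List.foldl_cons, List.filter_cons]
      by_cases h : |p.1 - track| < width
      · have hb : pvNear track width p = true := by simp [pvNear, h]
        rw [hb]
        simp [h, ih]
      · have hb : pvNear track width p = false := by simp [pvNear, h]
        rw [hb]
        simp [h, ih]

lemma pvA_xloop_filter (track width m : Int) (l : List (Int × Int)) :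
    pvA_xloop track width m l = pvFirst m (l.filter (pvNear track width)) := by
  induction l with
  | nil => rfl
  | cons p l ih =>
      simp only [pvA_xloop, List.filter_cons]
      by_cases hn : |p.1 - track| < width
      · simp [pvNear, hn, ih, pvFirst]
      · simp [pvNear, hn, ih]

lemma pvB_fold_filter (track width : Int) (l : List (Int × Int)) (st : Bool × Int × Int) :
    l.foldl (pvB_step track width) st
      = (l.filter (pvNear track width)).foldl
          (fun st p => if st.1 = false ∨ st.2.1 < p.2 then (true, p.2, p.1) else st) st := by
  induction l generalizing st with
  | nil => rfl
  | cons p l ih =>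
      simp only [List.foldl_cons, List.filter_cons]
      by_cases hn : |p.1 - track| < width
      · simp [pvNear, hn, ih, pvB_step]
      · simp [pvNear, hn, ih, pvB_step]

-- running argmax over already-filtered points, flag already true
lemma pvB_fold_true (l : List (Int × Int)) (y0 x0 : Int) :
    l.foldl (fun (st : Bool × Int × Int) p => if st.1 = false ∨ st.2.1 < p.2 then (true, p.2, p.1) else st) (true, y0, x0)
      = (true, (l.map Prod.snd).foldl max y0,
          if y0 = (l.map Prod.snd).foldl max y0 then x0
          else pvFirst ((l.map Prod.snd).foldl max y0) l) := by
  induction l generalizing y0 x0 with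
  | nil => simp
  | cons p l ih =>
      simp only [List.foldl_cons, List.map_cons]
      by_cases h : y0 < p.2
      · rw [if_pos (Or.inr h), ih]
        have hM : p.2 ≤ (l.map Prod.snd).foldl max p.2 := (PySem.List.le_foldl_max _ _).1
        have hmax : max y0 p.2 = p.2 := by omega
        rw [hmax]
        have hy0 : ¬ y0 = (l.map Prod.snd).foldl max p.2 := by omega
        simp only [pvFirst, if_neg hy0]
      · rw [if_neg (by simp [h]), ih]
        have hM : y0 ≤ (l.map Prod.snd).foldl max y0 := (PySem.List.le_foldl_max _ _).1
        have hmax : max y0 p.2 = y0 := by omega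
        rw [hmax]
        by_cases hy0 : y0 = (l.map Prod.snd).foldl max y0
        · simp only [pvFirst, if_pos hy0]
        · have hp2 : ¬ p.2 = (l.map Prod.snd).foldl max y0 := by omega
          simp only [pvFirst, if_neg hy0, if_neg hp2]

lemma pvB_eval_cons2 (track width : Int) (p q : Int × Int) (rest : List (Int × Int)) :
    xy_value_top_alt track (p :: q :: rest) width =
      ((((p :: q :: rest).foldl (pvB_step track width) (false, 0, 0)).2.2),
       (((p :: q :: rest).foldl (pvB_step track width) (false, 0, 0)).2.1)) := rfl

lemma pvA_collect_eval (track width : Int) (l : List (Int × Int)) :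
    pvA_collect track width l
      = (if l.filter (pvNear track width) = [] then 0 else 1,
         (l.filter (pvNear track width)).map Prod.snd) := by
  unfold pvA_collect
  rw [pvA_collect_spec]
  simp

lemma pvA_eval (track : Int) (arr : List (Int × Int)) (width : Int) (h : arr.length > 1) :
    xy_value_top track arr width
      = (pvA_xloop track width
           (if (pvA_collect track width arr).1 = 1
            then ((PySem.List.max? (pvA_collect track width arr).2 (fun y => y)).getD 0) else 0)
           (arr.foldl (fun acc p => acc ++ [p]) []),
         if (pvA_collect track width arr).1 = 1
         then ((PySem.List.max? (pvA_collect track width arr).2 (fun y => y)).getD 0) else 0) := by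
  unfold xy_value_top
  rw [if_pos h, if_pos h]

lemma pv_foldl_append_id (l acc : List (Int × Int)) :
    l.foldl (fun acc p => acc ++ [p]) acc = acc ++ l := by
  induction l generalizing acc with
  | nil => simp
  | cons p l ih => simp [List.foldl_cons, ih]

-- ===== VERDICT (by name: the statement is the Claim_ definition above) =====
theorem xy_value_top_spec : Claim_equal_xy_value_top := by
  intro track arr width _
  unfold Spec_xy_value_top
  match arr with
  | [] => rfl
  | [p] =>
      by_cases hn : |p.1 - track| < width <;>
        simp [xy_value_top, xy_value_top_alt, pvA_xloop, hn]
  | p :: q :: rest =>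
      have h2 : (p :: q :: rest).length > 1 := by simp
      rw [pvA_eval track (p :: q :: rest) width h2, pvB_eval_cons2, pv_foldl_append_id,
          pvA_collect_eval, pvA_xloop_filter, pvB_fold_filter]
      rcases hnl : (p :: q :: rest).filter (pvNear track width) with _ | ⟨r, ns⟩
      · simp [hnl, pvFirst]
      · simp only [List.nil_append]
        rw [hnl]
        simp only [List.foldl_cons]
        rw [if_pos (Or.inl trivial : True ∨ (0 : Int) < r.2), pvB_fold_true]
        simp [PySem.List.max?_id_cons, pvFirst]
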